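-- pv_equiv track=rewrite | github.com/ilyaguev2008-boop/city-president-game | bot.py | _draft_source_ids_after_skip
-- ===== SOURCE A (Python) =====
-- def _draft_source_ids_after_skip(linked: list[dict[str, object]], current_sid: int) -> list[int]:
--     """После «Пропустить»: другие включённые источники по кругу, затем текущий."""
--     ids = [int(r["id"]) for r in linked]
--     if not ids:
--         return []
--     if current_sid not in ids:
--         return ids
--     i = ids.index(current_sid)
--     others = ids[i + 1 :] + ids[:i]
--     return others + [current_sid]
-- ===== SOURCE B (Python) =====
-- def _draft_source_ids_after_skip(linked: list[dict[str, object]], current_sid: int) -> list[int]: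
--     """Single partitioning pass: split ids around the first occurrence of current_sid."""
--     ids = [int(r["id"]) for r in linked]
--     before, after = [], []
--     found = False
--     for x in ids:
--         if found:
--             after.append(x)
--         elif x == current_sid:
--             found = True
--         else:
--             before.append(x)
--     if not found:
--         return ids
--     return after + before + [current_sid]
-- ===== Notes on version B (the rewrite author's own statement) =====
-- stated objective: alternative
-- what changed: Replaces the membership test + .index lookup + two slice concatenations with one partitioning pass using a flip-once flag that splits ids into before/after the first occurrence of current_sid.
import Mathlib
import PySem

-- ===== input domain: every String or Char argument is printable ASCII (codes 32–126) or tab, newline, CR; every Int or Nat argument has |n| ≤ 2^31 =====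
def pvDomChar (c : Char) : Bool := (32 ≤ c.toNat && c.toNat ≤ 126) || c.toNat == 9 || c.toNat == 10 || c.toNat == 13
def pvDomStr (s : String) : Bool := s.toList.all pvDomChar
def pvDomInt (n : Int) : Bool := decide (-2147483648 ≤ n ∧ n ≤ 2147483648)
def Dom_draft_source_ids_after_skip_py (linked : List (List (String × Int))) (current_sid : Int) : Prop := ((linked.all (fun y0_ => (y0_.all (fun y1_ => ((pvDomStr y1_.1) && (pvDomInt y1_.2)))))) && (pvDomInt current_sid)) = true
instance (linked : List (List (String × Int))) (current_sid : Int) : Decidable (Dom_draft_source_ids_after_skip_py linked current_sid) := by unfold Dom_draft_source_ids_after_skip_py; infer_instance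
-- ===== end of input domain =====

-- B is an alternative decomposition: one partitioning pass with a flip-once flag instead of
-- membership test + .index + slice concatenation; return value only (no mutation in either version).

-- ===== PORT A =====
-- ids = [int(r["id"]) for r in linked]; r["id"] raises KeyError when absent — Pre_ excludes that,
-- so the getD 0 default is never the value used.
def pvIds (linked : List (List (String × Int))) : List Int :=
  linked.map (fun r => ((PySem.Dict.mk r).get? "id").getD 0)

def draft_source_ids_after_skip_py (linked : List (List (String × Int))) (current_sid : Int) : List Int :=
  let ids := pvIds linked
  if ids = [] then []
  else if current_sid ∈ ids then
    match PySem.List.index? ids current_sid with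
    | some i =>
        (PySem.List.slice ids (some ((i : Int) + 1)) none
          ++ PySem.List.slice ids none (some (i : Int))) ++ [current_sid]
    | none => ids   -- unreachable: current_sid ∈ ids
  else ids

-- ===== PORT B =====
def pvAltStep (sid : Int) (st : List Int × List Int × Bool) (x : Int) : List Int × List Int × Bool :=
  if st.2.2 then (st.1, st.2.1 ++ [x], true)
  else if x = sid then (st.1, st.2.1, true)
  else (st.1 ++ [x], st.2.1, false)

def draft_source_ids_after_skip_py_alt (linked : List (List (String × Int))) (current_sid : Int) : List Int :=
  let ids := linked.map (fun r => ((PySem.Dict.mk r).get? "id").getD 0)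
  let st := ids.foldl (pvAltStep current_sid) ([], [], false)
  if st.2.2 then st.2.1 ++ st.1 ++ [current_sid] else ids

-- ===== PRECONDITION & SPEC =====
-- Pre_ excludes exactly the inputs where r["id"] raises KeyError (a row without the "id" key).
def Pre_draft_source_ids_after_skip_py (linked : List (List (String × Int))) (current_sid : Int) : Prop :=
  (linked.all (fun r => (PySem.Dict.mk r).contains "id")) = true
instance (linked : List (List (String × Int))) (current_sid : Int) : Decidable (Pre_draft_source_ids_after_skip_py linked current_sid) := by unfold Pre_draft_source_ids_after_skip_py; infer_instance

def pvWitness_draft_source_ids_after_skip_py : (List (List (String × Int))) × Int :=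
  ([[("id", 1)], [("id", 2)], [("id", 3)]], 2)

def Spec_draft_source_ids_after_skip_py (linked : List (List (String × Int))) (current_sid : Int) (out : List Int) : Prop := out = draft_source_ids_after_skip_py_alt linked current_sid
instance (linked : List (List (String × Int))) (current_sid : Int) (out : List Int) : Decidable (Spec_draft_source_ids_after_skip_py linked current_sid out) := by unfold Spec_draft_source_ids_after_skip_py; infer_instance

-- ===== CLAIM (what is proved, stated in full; the proofs are below) =====
def Claim_equal_draft_source_ids_after_skip_py : Prop := ∀ (linked : List (List (String × Int))) (current_sid : Int), Dom_draft_source_ids_after_skip_py linked current_sid → Pre_draft_source_ids_after_skip_py linked current_sid → Spec_draft_source_ids_after_skip_py linked current_sid (draft_source_ids_after_skip_py linked current_sid)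

-- ===== LEMMAS AND PROOFS =====
theorem pvFoldl_true (sid : Int) (xs b a : List Int) :
    xs.foldl (pvAltStep sid) (b, a, true) = (b, a ++ xs, true) := by
  induction xs generalizing a with
  | nil => simp
  | cons x t ih => simp [pvAltStep, ih]

theorem pvFoldl_false (sid : Int) (xs : List Int) : ∀ (b a : List Int),
    xs.foldl (pvAltStep sid) (b, a, false) =
      match PySem.List.index? xs sid with
      | none => (b ++ xs, a, false)
      | some i => (b ++ xs.take i, a ++ xs.drop (i + 1), true) := by
  induction xs with
  | nil => intro b a; simp [PySem.List.index?]
  | cons x t ih =>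
    intro b a
    by_cases hx : x = sid
    · subst hx
      rw [PySem.List.index?_cons_self]
      simp [pvAltStep, pvFoldl_true]
    · rw [PySem.List.index?_cons_of_ne t hx]
      simp only [List.foldl_cons, pvAltStep]
      rw [if_neg (by decide : ¬ (false = true)), if_neg hx, ih]
      cases h : PySem.List.index? t sid with
      | none => simp
      | some i => simp

theorem pvMain (sid : Int) (ids : List Int) :
    (if ids = [] then ([] : List Int)
     else if sid ∈ ids then
       match PySem.List.index? ids sid with
       | some i =>
           (PySem.List.slice ids (some ((i : Int) + 1)) none
             ++ PySem.List.slice ids none (some (i : Int))) ++ [sid]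
       | none => ids
     else ids)
    =
    (let st := ids.foldl (pvAltStep sid) ([], [], false);
     if st.2.2 then st.2.1 ++ st.1 ++ [sid] else ids) := by
  have hfold := pvFoldl_false sid ids [] []
  by_cases hmem : sid ∈ ids
  · have hne : ids ≠ [] := by intro h; rw [h] at hmem; simp at hmem
    obtain ⟨i, hi⟩ := Option.isSome_iff_exists.mp ((PySem.List.index?_isSome_iff ids sid).mpr hmem)
    rw [hi] at hfold
    simp only [hfold, if_neg hne, if_pos hmem, hi, List.nil_append]
    have h1 : ((i : Int) + 1) = ((i + 1 : Nat) : Int) := by push_cast; ring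
    rw [h1, PySem.List.slice_from_natCast, PySem.List.slice_to_natCast]
    simp
  · rw [(PySem.List.index?_eq_none_iff ids sid).mpr hmem] at hfold
    simp only [hfold, List.nil_append]
    by_cases hne : ids = []
    · simp [hne]
    · simp [if_neg hne, if_neg hmem]

theorem pvWitness_ok :
    Dom_draft_source_ids_after_skip_py pvWitness_draft_source_ids_after_skip_py.1 pvWitness_draft_source_ids_after_skip_py.2 ∧
    Pre_draft_source_ids_after_skip_py pvWitness_draft_source_ids_after_skip_py.1 pvWitness_draft_source_ids_after_skip_py.2 := by decide

-- ===== VERDICT (by name: the statement is the Claim_ definition above) =====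
theorem draft_source_ids_after_skip_py_spec : Claim_equal_draft_source_ids_after_skip_py := by
  intro linked sid _ _
  unfold Spec_draft_source_ids_after_skip_py
  unfold draft_source_ids_after_skip_py draft_source_ids_after_skip_py_alt
  exact pvMain sid (pvIds linked)
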